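-- pv_equiv track=rewrite | github.com/ankitshah009/leetcode_python | graphs/1611-minimum_one_bit_operations_to_make_integers_zero.py | minimumOneBitOperations
-- ===== SOURCE A (Python) =====
-- def minimumOneBitOperations(n: int) -> int:
--     """
--     Mathematical approach with alternating signs.
--
--     If n has bits at positions b1 > b2 > b3 > ..., then:
--     f(n) = (2^(b1+1) - 1) - (2^(b2+1) - 1) + (2^(b3+1) - 1) - ...
--     """
--     result = 0
--     sign = 1
--
--     while n > 0:
--         # Find position of highest bit
--         k = n.bit_length() - 1
--
--         # Add or subtract (2^(k+1) - 1)
--         result += sign * ((1 << (k + 1)) - 1)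
--
--         # Remove highest bit
--         n ^= (1 << k)
--
--         # Alternate sign
--         sign = -sign
--
--     return result
-- ===== SOURCE B (Python) =====
-- def minimumOneBitOperations(n: int) -> int:
--     ans = 0
--     while n > 0:
--         ans ^= n
--         n >>= 1
--     return ans
-- ===== Notes on version B (the rewrite author's own statement) =====
-- stated objective: idiomatic
-- what changed: B computes the inverse Gray code by the classic XOR fold (ans ^= n; n >>= 1), instead of A's scan of the highest set bit with an alternating signed sum of (2^(k+1)-1) terms.
import Mathlib
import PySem

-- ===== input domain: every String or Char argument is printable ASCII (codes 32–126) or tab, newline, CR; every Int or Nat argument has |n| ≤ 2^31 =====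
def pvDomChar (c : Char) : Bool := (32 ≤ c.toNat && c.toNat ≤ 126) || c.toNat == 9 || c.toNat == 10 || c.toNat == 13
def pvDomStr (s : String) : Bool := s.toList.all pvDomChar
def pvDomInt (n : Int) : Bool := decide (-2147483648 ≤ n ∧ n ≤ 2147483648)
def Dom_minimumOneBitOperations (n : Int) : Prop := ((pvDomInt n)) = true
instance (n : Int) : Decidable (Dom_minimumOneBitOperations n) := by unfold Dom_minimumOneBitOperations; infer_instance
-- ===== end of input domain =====

-- B replaces A's highest-set-bit scan with alternating signed sum by the classic XOR-fold
-- inverse Gray code (ans ^= n; n >>= 1); objective: idiomatic, same return value everywhere.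

-- ===== PORT A =====
-- termination helper for A's loop: clearing the highest set bit strictly decreases n
theorem pvAstep_lt (n : Int) (h : 0 < n) :
    (PySem.Int.bxor n ((1 : Int) <<< (PySem.Int.bitLength n - 1))).toNat < n.toNat := by
  have hk : PySem.Int.bitLength n ≠ 0 := by
    intro h0
    have := PySem.Int.lt_two_pow_bitLength n
    rw [h0] at this
    omega
  set k := PySem.Int.bitLength n - 1 with hkdef
  have hbl : PySem.Int.bitLength n = k + 1 := by omega
  have hlo : 2 ^ k ≤ n.natAbs := by
    have := PySem.Int.two_pow_bitLength_le n (by omega)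
    simpa [hkdef] using this
  have hhi : n.natAbs < 2 ^ (k + 1) := by
    have := PySem.Int.lt_two_pow_bitLength n
    rwa [hbl] at this
  have hsh : ((1 : Int) <<< k) = ((2 ^ k : Nat) : Int) := by
    rw [Int.shiftLeft_eq]; push_cast; ring
  rw [hsh, PySem.Int.bxor_of_nonneg (by omega) (by positivity)]
  have habs : n.natAbs = n.toNat := by omega
  rw [habs] at hlo hhi
  rw [Int.toNat_natCast]
  -- n.toNat = 2^k + r with r < 2^k, and (2^k + r) ^^^ 2^k = r
  obtain ⟨r, hr, hrlt⟩ : ∃ r, n.toNat = 2 ^ k + r ∧ r < 2 ^ k := by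
    refine ⟨n.toNat - 2 ^ k, by omega, by omega⟩
  have hadd : 2 ^ k ^^^ r = 2 ^ k + r := by
    apply Nat.eq_of_testBit_eq
    intro i
    rcases lt_trichotomy i k with hik | hik | hik
    · rw [Nat.testBit_two_pow_add_gt hik, Nat.testBit_xor,
        Nat.testBit_two_pow_of_ne (by omega)]
      simp
    · subst hik
      rw [Nat.testBit_two_pow_add_eq, Nat.testBit_xor, Nat.testBit_two_pow_self,
        Nat.testBit_eq_false_of_lt hrlt]
      decide
    · have h1 : 2 ^ k + r < 2 ^ i := by
        calc 2 ^ k + r < 2 ^ k + 2 ^ k := by omega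
        _ = 2 ^ (k + 1) := by ring
        _ ≤ 2 ^ i := Nat.pow_le_pow_right (by omega) (by omega)
      rw [Nat.testBit_eq_false_of_lt h1, Nat.testBit_xor,
        Nat.testBit_two_pow_of_ne (by omega), Nat.testBit_eq_false_of_lt (by omega)]
      rfl
  have : n.toNat ^^^ 2 ^ k = r := by
    rw [hr, ← hadd, Nat.xor_comm (2 ^ k) r, Nat.xor_xor_cancel_right]
  simp only [Int.toNat_natCast, this]
  have : (0:Nat) < 2 ^ k := by positivity
  omega

-- literal port of A's while loop over state (n, result, sign)
def pyAloop (n result sign : Int) : Int :=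
  if h : 0 < n then
    let k : Nat := PySem.Int.bitLength n - 1
    pyAloop (PySem.Int.bxor n ((1 : Int) <<< k)) (result + sign * ((1 : Int) <<< (k + 1) - 1)) (-sign)
  else result
termination_by n.toNat
decreasing_by exact pvAstep_lt n h

def minimumOneBitOperations (n : Int) : Int := pyAloop n 0 1

-- ===== PORT B =====
-- termination helper for B's loop: n >>= 1 strictly decreases positive n
theorem pvBstep_lt (n : Int) (h : 0 < n) : (n >>> (1 : Nat)).toNat < n.toNat := by
  have : (n >>> (1 : Nat)) = n / 2 := by
    rw [Int.shiftRight_eq_div_pow]; norm_num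
  rw [this]; omega

-- literal port of B's while loop over state (n, ans)
def pyBloop (n ans : Int) : Int :=
  if h : 0 < n then
    pyBloop (n >>> (1 : Nat)) (PySem.Int.bxor ans n)
  else ans
termination_by n.toNat
decreasing_by exact pvBstep_lt n h

def minimumOneBitOperations_alt (n : Int) : Int := pyBloop n 0

-- ===== PRECONDITION & SPEC =====
def Spec_minimumOneBitOperations (n : Int) (out : Int) : Prop := out = minimumOneBitOperations_alt n
instance (n : Int) (out : Int) : Decidable (Spec_minimumOneBitOperations n out) := by unfold Spec_minimumOneBitOperations; infer_instance

-- ===== CLAIM (what is proved, stated in full; the proofs are below) =====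
def Claim_equal_minimumOneBitOperations : Prop := ∀ (n : Int), Dom_minimumOneBitOperations n → Spec_minimumOneBitOperations n (minimumOneBitOperations n)

-- ===== LEMMAS AND PROOFS =====

-- mathematical reference: the inverse Gray code as structural recursion on Nat
def grayInv : Nat → Nat
  | 0 => 0
  | n + 1 => (n + 1) ^^^ grayInv ((n + 1) / 2)
decreasing_by exact Nat.div_lt_self (by omega) (by omega)

theorem grayInv_eq (m : Nat) : grayInv m = m ^^^ grayInv (m / 2) := by
  cases m with
  | zero => simp [grayInv]
  | succ n => rw [grayInv]

theorem grayInv_lt (j : Nat) : ∀ m, m < 2 ^ j → grayInv m < 2 ^ j := by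
  intro m
  induction m using Nat.strong_induction_on with
  | _ m ih =>
    intro hm
    rcases Nat.eq_zero_or_pos m with h0 | h0
    · subst h0; simp [grayInv]
    · rw [grayInv_eq]
      exact Nat.xor_lt_two_pow hm
        (ih (m / 2) (Nat.div_lt_self h0 (by omega)) (by omega))

-- complement: XOR against an all-ones mask is subtraction from it
theorem xor_mask (k x : Nat) (h : x < 2 ^ k) : (2 ^ k - 1) ^^^ x = 2 ^ k - 1 - x := by
  have hx : 2 ^ k - 1 - x = 2 ^ k - (x + 1) := by
    have : (0:Nat) < 2 ^ k := by positivity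
    omega
  rw [hx]
  apply Nat.eq_of_testBit_eq
  intro i
  rw [Nat.testBit_xor, Nat.testBit_two_pow_sub_one, Nat.testBit_two_pow_sub_succ h]
  by_cases hik : i < k
  · simp [hik]
  · have hf : x.testBit i = false :=
      Nat.testBit_eq_false_of_lt
        (lt_of_lt_of_le h (Nat.pow_le_pow_right (by omega) (by omega)))
    simp [hik, hf]

-- disjoint bits: 2^k XOR r = 2^k + r when r < 2^k
theorem xor_two_pow_add (k r : Nat) (h : r < 2 ^ k) : 2 ^ k ^^^ r = 2 ^ k + r := by
  apply Nat.eq_of_testBit_eq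
  intro i
  rcases lt_trichotomy i k with hik | hik | hik
  · rw [Nat.testBit_two_pow_add_gt hik, Nat.testBit_xor,
      Nat.testBit_two_pow_of_ne (by omega)]
    simp
  · subst hik
    rw [Nat.testBit_two_pow_add_eq, Nat.testBit_xor, Nat.testBit_two_pow_self,
      Nat.testBit_eq_false_of_lt h]
    decide
  · have h1 : 2 ^ k + r < 2 ^ i := by
      calc 2 ^ k + r < 2 ^ k + 2 ^ k := by omega
      _ = 2 ^ (k + 1) := by ring
      _ ≤ 2 ^ i := Nat.pow_le_pow_right (by omega) (by omega)
    rw [Nat.testBit_eq_false_of_lt h1, Nat.testBit_xor,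
      Nat.testBit_two_pow_of_ne (by omega), Nat.testBit_eq_false_of_lt (by omega)]
    rfl

-- reflection: grayInv (2^k + m) = (2^(k+1) - 1) - grayInv m for m < 2^k
theorem grayInv_reflect : ∀ k m, m < 2 ^ k → grayInv (2 ^ k + m) = 2 ^ (k + 1) - 1 - grayInv m := by
  intro k
  induction k with
  | zero =>
    intro m hm
    interval_cases m
    have h0 : grayInv 0 = 0 := by simp [grayInv]
    have h1 : grayInv 1 = 1 := by rw [grayInv_eq]; simp [h0]
    simp [h0, h1]
  | succ k ih =>
    intro m hm
    have hdiv : (2 ^ (k + 1) + m) / 2 = 2 ^ k + m / 2 := by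
      have : 2 ^ (k + 1) = 2 * 2 ^ k := by ring
      omega
    have hm2 : m / 2 < 2 ^ k := by
      have : 2 ^ (k + 1) = 2 * 2 ^ k := by ring
      omega
    have ht : grayInv (m / 2) < 2 ^ k := grayInv_lt k _ hm2
    rw [grayInv_eq, hdiv, ih _ hm2]
    set t := grayInv (m / 2) with htdef
    have h1 : 2 ^ (k + 1) - 1 - t = (2 ^ (k + 1) - 1) ^^^ t := by
      rw [xor_mask _ _ (by calc t < 2 ^ k := ht
        _ ≤ 2 ^ (k + 1) := Nat.pow_le_pow_right (by omega) (by omega))]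
    have h2 : 2 ^ (k + 1) + m = 2 ^ (k + 1) ^^^ m := (xor_two_pow_add _ _ hm).symm
    rw [h1, h2]
    have h3 : (2 ^ (k + 1) ^^^ m) ^^^ ((2 ^ (k + 1) - 1) ^^^ t)
        = (2 ^ (k + 1) ^^^ (2 ^ (k + 1) - 1)) ^^^ (m ^^^ t) := by
      rw [Nat.xor_assoc, Nat.xor_assoc]
      congr 1
      rw [← Nat.xor_assoc, ← Nat.xor_assoc, Nat.xor_comm m]
    have h4 : 2 ^ (k + 1) ^^^ (2 ^ (k + 1) - 1) = 2 ^ (k + 2) - 1 := by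
      rw [xor_two_pow_add _ _ (by
        have : (0:Nat) < 2 ^ (k + 1) := by positivity
        omega)]
      have : (0:Nat) < 2 ^ (k + 1) := by positivity
      calc 2 ^ (k + 1) + (2 ^ (k + 1) - 1) = 2 * 2 ^ (k + 1) - 1 := by omega
      _ = 2 ^ (k + 2) - 1 := by ring_nf
    have hmt : m ^^^ t < 2 ^ (k + 1) :=
      Nat.xor_lt_two_pow hm (by calc t < 2 ^ k := ht
        _ ≤ 2 ^ (k + 1) := Nat.pow_le_pow_right (by omega) (by omega))
    rw [h3, h4, xor_mask _ _ (by calc m ^^^ t < 2 ^ (k + 1) := hmt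
      _ ≤ 2 ^ (k + 2) := Nat.pow_le_pow_right (by omega) (by omega))]
    rw [grayInv_eq m, ← htdef]

-- A's loop computes r + s * grayInv n.toNat
theorem pyAloop_eq (m : Nat) : ∀ (n r s : Int), n.toNat = m →
    pyAloop n r s = r + s * (grayInv n.toNat : Int) := by
  induction m using Nat.strong_induction_on with
  | _ m ih =>
    intro n r s hm
    rw [pyAloop]
    split_ifs with h
    · show pyAloop (PySem.Int.bxor n ((1 : Int) <<< (PySem.Int.bitLength n - 1)))
        (r + s * ((1 : Int) <<< (PySem.Int.bitLength n - 1 + 1) - 1)) (-s)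
        = r + s * ((grayInv n.toNat : Nat) : Int) -- same bit facts as in pvAstep_lt
      have hkne : PySem.Int.bitLength n ≠ 0 := by
        intro h0
        have := PySem.Int.lt_two_pow_bitLength n
        rw [h0] at this
        omega
      set k := PySem.Int.bitLength n - 1 with hkdef
      have hbl : PySem.Int.bitLength n = k + 1 := by omega
      have hlo : 2 ^ k ≤ n.toNat := by
        have := PySem.Int.two_pow_bitLength_le n (by omega)
        rw [← hkdef] at this
        omega
      have hhi : n.toNat < 2 ^ (k + 1) := by
        have := PySem.Int.lt_two_pow_bitLength n
        rw [hbl] at this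
        omega
      have hsh : ((1 : Int) <<< k) = ((2 ^ k : Nat) : Int) := by
        rw [Int.shiftLeft_eq]; push_cast; ring
      obtain ⟨q, hq, hqlt⟩ : ∃ q, n.toNat = 2 ^ k + q ∧ q < 2 ^ k :=
        ⟨n.toNat - 2 ^ k, by omega, by omega⟩
      have hx : PySem.Int.bxor n ((1 : Int) <<< k) = ((q : Nat) : Int) := by
        rw [hsh, PySem.Int.bxor_of_nonneg (by omega) (by positivity)]
        congr 1
        rw [Int.toNat_natCast, hq, ← xor_two_pow_add k q hqlt, Nat.xor_comm (2 ^ k) q,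
          Nat.xor_xor_cancel_right]
      have hrec := ih q (by omega) (((q : Nat) : Int))
        (r + s * ((1 : Int) <<< (k + 1) - 1)) (-s) (by simp)
      rw [hx, hrec]
      have hgq : ((q:Int)).toNat = q := by simp
      rw [hgq]
      have hrefl : grayInv n.toNat = 2 ^ (k + 1) - 1 - grayInv q := by
        rw [hq]; exact grayInv_reflect k q hqlt
      have hgb : grayInv q < 2 ^ (k + 1) :=
        grayInv_lt _ q (by calc q < 2 ^ k := hqlt
          _ ≤ 2 ^ (k + 1) := Nat.pow_le_pow_right (by omega) (by omega))
      have hsh2 : ((1 : Int) <<< (k + 1)) = ((2 ^ (k + 1) : Nat) : Int) := by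
        rw [Int.shiftLeft_eq]; push_cast; ring
      rw [hrefl, hsh2]
      have hp : (0:Nat) < 2 ^ (k + 1) := by positivity
      push_cast [Nat.cast_sub (by omega : grayInv q ≤ 2 ^ (k + 1) - 1),
        Nat.cast_sub (by omega : 1 ≤ 2 ^ (k + 1))]
      ring
    · have : n.toNat = 0 := by omega
      rw [this]
      simp [grayInv]

-- B's loop computes ans XOR grayInv n.toNat
theorem pyBloop_eq (m : Nat) : ∀ (n ans : Int), n.toNat = m → 0 ≤ ans →
    pyBloop n ans = ((ans.toNat ^^^ grayInv n.toNat : Nat) : Int) := by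
  induction m using Nat.strong_induction_on with
  | _ m ih =>
    intro n ans hm hans
    rw [pyBloop]
    split_ifs with h
    · have hhalf : (n >>> (1 : Nat)) = ((n.toNat / 2 : Nat) : Int) := by
        rw [Int.shiftRight_eq_div_pow]
        norm_num
        omega
      have hxa : PySem.Int.bxor ans n = ((ans.toNat ^^^ n.toNat : Nat) : Int) := by
        rw [PySem.Int.bxor_of_nonneg hans (by omega)]
      have hrec := ih (n.toNat / 2) (by omega) (n >>> (1 : Nat))
        (PySem.Int.bxor ans n) (by rw [hhalf]; exact Int.toNat_natCast _) (by rw [hxa]; positivity)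
      rw [hrec, hhalf, hxa]
      simp only [Int.toNat_natCast]
      rw [grayInv_eq n.toNat, ← Nat.xor_assoc]
    · have h0 : n.toNat = 0 := by omega
      rw [h0]
      simp [grayInv, Int.toNat_of_nonneg hans]

-- ===== VERDICT (by name: the statement is the Claim_ definition above) =====
theorem minimumOneBitOperations_spec : Claim_equal_minimumOneBitOperations := by
  intro n _
  unfold Spec_minimumOneBitOperations minimumOneBitOperations minimumOneBitOperations_alt
  rw [pyAloop_eq n.toNat n 0 1 rfl, pyBloop_eq n.toNat n 0 rfl (by omega)]
  simp
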